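-- pv_equiv track=rewrite | github.com/hkbakke/fwgen | fwgen/fwgen.py | _diff_filter
-- ===== SOURCE A (Python) =====
-- def _diff_filter(diff):
--     """
--     Ipset seems to add entries in a non-deterministic order when doing
--     atomic replace. This will cause the differ to output changes even
--     when there are none. To fix this, ensure the entries for each ipset
--     is sorted before being diffed.
--     """
--     entries = []
--
--     for i in diff:
--         if i.startswith('add '):
--             entries.append(i)
--             continue
--
--         for entry in sorted(entries):
--             yield entry
--
--         entries = []
--         yield i
--
--     # Ensure we get the last content if the in_data ends in 'add'-entries
--     for entry in sorted(entries):
--         yield entry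
-- ===== SOURCE B (Python) =====
-- def _diff_filter(diff):
--     # Decorate-sort-undecorate: give every line a numeric block key (non-add
--     # lines close a block and get an odd key), then ONE global stable sort of
--     # the (key, line) pairs puts each add-run in sorted order in place while
--     # keeping every other line where it was.
--     keyed = []
--     block = 0
--     for line in diff:
--         if line.startswith('add '):
--             keyed.append((2 * block, line))
--         else:
--             keyed.append((2 * block + 1, line))
--             block += 1
--     for _, line in sorted(keyed):
--         yield line
-- ===== Notes on version B (the rewrite author's own statement) =====
-- stated objective: alternative
-- what changed: Replaces A's streaming accumulator (buffer adds, flush sorted buffer on each non-add line, tail flush) with decorate-sort-undecorate: every line gets a numeric block key (adds 2*block, non-add lines 2*block+1 closing the block), one global stable sort of the (key, line) pairs orders each add-run while fixing the other lines, then the keys are stripped.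
import Mathlib
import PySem

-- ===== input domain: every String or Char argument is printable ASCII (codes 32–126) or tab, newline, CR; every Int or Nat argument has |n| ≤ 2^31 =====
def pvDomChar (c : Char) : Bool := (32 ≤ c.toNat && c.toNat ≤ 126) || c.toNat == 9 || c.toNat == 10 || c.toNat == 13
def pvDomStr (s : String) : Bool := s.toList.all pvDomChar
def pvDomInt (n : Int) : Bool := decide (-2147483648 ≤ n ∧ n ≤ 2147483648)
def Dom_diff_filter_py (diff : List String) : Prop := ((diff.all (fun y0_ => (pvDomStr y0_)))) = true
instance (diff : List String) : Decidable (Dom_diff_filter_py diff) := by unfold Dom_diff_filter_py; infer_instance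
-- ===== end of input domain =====

-- B replaces A's streaming flush-on-non-add accumulator by decorate–sort–undecorate:
-- one global stable sort of (blockKey, line) pairs, then stripping the keys (alternative).


-- ===== PORT A =====
-- A: fold keeping (entries, out); a non-add line flushes sorted(entries) then itself; tail flush at the end.
def diff_filter_py (diff : List String) : List String :=
  let st := diff.foldl
    (fun (acc : List String × List String) i =>
      if PySem.Str.startswith i "add " then (acc.1 ++ [i], acc.2)
      else (([] : List String), acc.2 ++ PySem.List.sorted acc.1 (fun x => x) false ++ [i]))
    (([] : List String), ([] : List String))
  st.2 ++ PySem.List.sorted st.1 (fun x => x) false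

-- ===== PORT B =====
-- B: decorate every line with an Int block key (adds: 2*block; others: 2*block+1, closing the
-- block), then one global stable sort of the pairs (Python tuple order = key then line), undecorate.
def diff_filter_py_alt (diff : List String) : List String :=
  let st := diff.foldl
    (fun (acc : List (Int × String) × Int) line =>
      if PySem.Str.startswith line "add " then (acc.1 ++ [(2 * acc.2, line)], acc.2)
      else (acc.1 ++ [(2 * acc.2 + 1, line)], acc.2 + 1))
    (([] : List (Int × String)), (0 : Int))
  (PySem.List.sorted2 st.1 (fun p => p.1) (fun p => p.2) false).map (fun p => p.2)

-- ===== PRECONDITION & SPEC =====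
def Spec_diff_filter_py (diff : List String) (out : List String) : Prop := out = diff_filter_py_alt diff
instance (diff : List String) (out : List String) : Decidable (Spec_diff_filter_py diff out) := by unfold Spec_diff_filter_py; infer_instance

-- ===== CLAIM (what is proved, stated in full; the proofs are below) =====
def Claim_equal_diff_filter_py : Prop := ∀ (diff : List String), Dom_diff_filter_py diff → Spec_diff_filter_py diff (diff_filter_py diff)

-- ===== LEMMAS AND PROOFS =====

-- middle form for A: pvG es l = what remains to be emitted given pending add-entries es
def pvG (es : List String) : List String → List String
  | [] => PySem.List.sorted es (fun x => x) false
  | x :: xs =>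
    if PySem.Str.startswith x "add " then pvG (es ++ [x]) xs
    else PySem.List.sorted es (fun x => x) false ++ x :: pvG [] xs

lemma pvA_loop (l : List String) (es out : List String) :
    (l.foldl (fun (acc : List String × List String) i =>
      if PySem.Str.startswith i "add " then (acc.1 ++ [i], acc.2)
      else (([] : List String), acc.2 ++ PySem.List.sorted acc.1 (fun x => x) false ++ [i])) (es, out)).2
      ++ PySem.List.sorted (l.foldl (fun (acc : List String × List String) i =>
      if PySem.Str.startswith i "add " then (acc.1 ++ [i], acc.2)
      else (([] : List String), acc.2 ++ PySem.List.sorted acc.1 (fun x => x) false ++ [i])) (es, out)).1 (fun x => x) false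
      = out ++ pvG es l := by
  induction l generalizing es out with
  | nil => simp [pvG]
  | cons x xs ih =>
    by_cases h : PySem.Str.startswith x "add "
    · simp only [List.foldl_cons, h, if_pos, pvG, ih]
    · simp only [List.foldl_cons, h, pvG, Bool.false_eq_true, if_false, ih]
      simp

lemma pvG_run (l : List String) (es : List String) :
    pvG es l = PySem.List.sorted (es ++ l.takeWhile (fun s => PySem.Str.startswith s "add ")) (fun x => x) false
      ++ (match l.dropWhile (fun s => PySem.Str.startswith s "add ") with
          | [] => []
          | y :: ys => y :: pvG [] ys) := by
  induction l generalizing es with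
  | nil => simp [pvG]
  | cons x xs ih =>
    by_cases h : PySem.Str.startswith x "add "
    · simp only [pvG, h, if_pos, List.takeWhile_cons, List.dropWhile_cons, ih]
      simp
    · simp only [pvG, h, List.takeWhile_cons, List.dropWhile_cons, Bool.false_eq_true, if_false]
      simp

-- B-side middle form: the decorated list as a structural recursion
def pvDec : List String → Int → List (Int × String)
  | [], _ => []
  | x :: xs, b =>
    if PySem.Str.startswith x "add " then (2 * b, x) :: pvDec xs b
    else (2 * b + 1, x) :: pvDec xs (b + 1)

lemma pvB_loop (l : List String) (k : List (Int × String)) (b : Int) :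
    (l.foldl (fun (acc : List (Int × String) × Int) line =>
      if PySem.Str.startswith line "add " then (acc.1 ++ [(2 * acc.2, line)], acc.2)
      else (acc.1 ++ [(2 * acc.2 + 1, line)], acc.2 + 1)) (k, b)).1
    = k ++ pvDec l b := by
  induction l generalizing k b with
  | nil => simp [pvDec]
  | cons x xs ih =>
    by_cases h : PySem.Str.startswith x "add "
    · simp only [List.foldl_cons, h, if_pos, pvDec, ih]; simp
    · simp only [List.foldl_cons, h, pvDec, Bool.false_eq_true, if_false, ih]; simp

lemma pvDec_lb (l : List String) (b : Int) : ∀ p ∈ pvDec l b, 2 * b ≤ p.1 := by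
  induction l generalizing b with
  | nil => simp [pvDec]
  | cons x xs ih =>
    intro p hp
    by_cases h : PySem.Str.startswith x "add " <;> simp only [pvDec, h, if_pos, Bool.false_eq_true, if_false, List.mem_cons] at hp
    · rcases hp with rfl | hp
      · simp
      · exact ih b p hp
    · rcases hp with rfl | hp
      · simp
      · have := ih (b + 1) p hp; omega

-- insertBy skips a prefix none of whose elements x goes before
lemma pvInsertBy_append {α : Type} (before : α → α → Bool) (x : α) (p t : List α)
    (h : ∀ y ∈ p, before x y = false) :
    PySem.List.insertBy before x (p ++ t) = p ++ PySem.List.insertBy before x t := by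
  induction p with
  | nil => simp
  | cons y ys ih =>
    simp only [List.cons_append, PySem.List.insertBy, h y (by simp)]
    simp only [Bool.false_eq_true, if_false, List.cons.injEq, true_and]
    exact ih (fun z hz => h z (by simp [hz]))

-- the fold of insertBy keeps an untouched prefix
lemma pvFold_prefix {α : Type} (before : α → α → Bool) (P : List α) (l acc : List α)
    (h : ∀ x ∈ l, ∀ y ∈ P, before x y = false) :
    l.foldl (fun a x => PySem.List.insertBy before x a) (P ++ acc)
      = P ++ l.foldl (fun a x => PySem.List.insertBy before x a) acc := by
  induction l generalizing acc with
  | nil => simp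
  | cons x xs ih =>
    simp only [List.foldl_cons]
    rw [pvInsertBy_append before x P acc (h x (by simp)),
        ih _ (fun z hz y hy => h z (by simp [hz]) y hy)]

-- the lexicographic "before" test sorted2 uses on (key, line) pairs
def pvB2 (a b : Int × String) : Bool :=
  decide (a.1 < b.1) || (!decide (b.1 < a.1) && decide (a.2 < b.2))

lemma pvSorted2_eq (xs : List (Int × String)) :
    PySem.List.sorted2 xs (fun p => p.1) (fun p => p.2) false
      = xs.foldl (fun acc x => PySem.List.insertBy pvB2 x acc) [] := rfl

lemma pvB2_false (x y : Int × String) (h : y.1 < x.1) : pvB2 x y = false := by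
  unfold pvB2
  rw [decide_eq_false (by omega : ¬ x.1 < y.1), decide_eq_true h]
  simp

-- split a stable sort at a strict key gap
lemma pvSorted2_split (l₁ l₂ : List (Int × String))
    (h : ∀ a ∈ l₁, ∀ b ∈ l₂, a.1 < b.1) :
    PySem.List.sorted2 (l₁ ++ l₂) (fun p => p.1) (fun p => p.2) false
      = PySem.List.sorted2 l₁ (fun p => p.1) (fun p => p.2) false
        ++ PySem.List.sorted2 l₂ (fun p => p.1) (fun p => p.2) false := by
  have hmem : ∀ y ∈ PySem.List.sorted2 l₁ (fun p => p.1) (fun p => p.2) false, y ∈ l₁ :=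
    fun y hy => (PySem.List.sorted2_perm l₁ (fun p => p.1) (fun p => p.2) false).mem_iff.mp hy
  rw [pvSorted2_eq, pvSorted2_eq, pvSorted2_eq, List.foldl_append]
  have hh : ∀ x ∈ l₂, ∀ y ∈ l₁.foldl (fun acc x => PySem.List.insertBy pvB2 x acc) [],
      pvB2 x y = false := by
    intro x hx y hy
    exact pvB2_false x y (h y (hmem y (by rw [pvSorted2_eq]; exact hy)) x hx)
  rw [show (l₁.foldl (fun acc x => PySem.List.insertBy pvB2 x acc) [])
        = (l₁.foldl (fun acc x => PySem.List.insertBy pvB2 x acc) []) ++ [] from (List.append_nil _).symm]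
  rw [pvFold_prefix pvB2 _ l₂ [] hh]
  simp

lemma pvInsertBy_congr {α : Type} (before before' : α → α → Bool) (x : α) (ys : List α)
    (h : ∀ y ∈ ys, before x y = before' x y) :
    PySem.List.insertBy before x ys = PySem.List.insertBy before' x ys := by
  induction ys with
  | nil => rfl
  | cons y t ih =>
    simp only [PySem.List.insertBy, h y (by simp)]
    by_cases hb : before' x y = true
    · simp [hb]
    · simp only [Bool.not_eq_true] at hb
      simp [hb, ih (fun z hz => h z (by simp [hz]))]

lemma pvInsertBy_map {α β : Type} (bs : β → β → Bool) (f : α → β) (x : α) (ys : List α) :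
    (PySem.List.insertBy (fun a b => bs (f a) (f b)) x ys).map f
      = PySem.List.insertBy bs (f x) (ys.map f) := by
  induction ys with
  | nil => rfl
  | cons y t ih =>
    simp only [PySem.List.insertBy, List.map_cons]
    by_cases hb : bs (f x) (f y) = true
    · simp [hb]
    · simp only [Bool.not_eq_true] at hb
      simp [hb, ih]

-- a constant-first-key block sorts by the second key alone, stably
lemma pvSorted2_const (run : List (Int × String)) (c : Int) (h : ∀ p ∈ run, p.1 = c) :
    (PySem.List.sorted2 run (fun p => p.1) (fun p => p.2) false).map (fun p => p.2)
      = PySem.List.sorted (run.map (fun p => p.2)) (fun x => x) false := by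
  rw [pvSorted2_eq, PySem.List.sorted_eq_foldl_insertBy]
  -- step 1: pvB2 behaves as the second-key test on constant-first-key elements
  have step1 : ∀ (run acc : List (Int × String)), (∀ p ∈ run, p.1 = c) → (∀ p ∈ acc, p.1 = c) →
      run.foldl (fun a x => PySem.List.insertBy pvB2 x a) acc
        = run.foldl (fun a x => PySem.List.insertBy (fun p q => decide (p.2 < q.2)) x a) acc := by
    intro run
    induction run with
    | nil => intro acc _ _; rfl
    | cons x t ih =>
      intro acc hr ha
      simp only [List.foldl_cons]
      rw [pvInsertBy_congr pvB2 (fun p q => decide (p.2 < q.2)) x acc (by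
        intro y hy
        unfold pvB2
        rw [hr x (by simp), ha y hy]
        simp)]
      exact ih _ (fun p hp => hr p (by simp [hp])) (fun p hp => by
        rcases (PySem.List.mem_insertBy _ _ _ _).mp hp with rfl | hp'
        · exact hr p (by simp)
        · exact ha p hp')
  rw [step1 run [] h (by simp)]
  -- step 2: mapping the projection commutes with the fold of insertions
  have step2 : ∀ (run : List (Int × String)) (acc : List (Int × String)),
      (run.foldl (fun a x => PySem.List.insertBy (fun p q => decide (p.2 < q.2)) x a) acc).map (fun p => p.2)
        = (run.map (fun p => p.2)).foldl (fun a x => PySem.List.insertBy (fun p q => decide (p < q)) x a)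
            (acc.map (fun p => p.2)) := by
    intro run
    induction run with
    | nil => intro acc; rfl
    | cons x t ih =>
      intro acc
      simp only [List.foldl_cons, List.map_cons]
      rw [← pvInsertBy_map (fun p q => decide (p < q)) (fun p : Int × String => p.2) x acc]
      exact ih _
  simpa using step2 run []

lemma pvDec_run (l : List String) (b : Int) :
    pvDec l b = (l.takeWhile (fun s => PySem.Str.startswith s "add ")).map (fun s => (2 * b, s))
      ++ (match l.dropWhile (fun s => PySem.Str.startswith s "add ") with
          | [] => []
          | y :: ys => (2 * b + 1, y) :: pvDec ys (b + 1)) := by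
  induction l generalizing b with
  | nil => simp [pvDec]
  | cons x xs ih =>
    by_cases h : PySem.Str.startswith x "add "
    · simp only [pvDec, h, if_pos, List.takeWhile_cons, List.dropWhile_cons, ih]
      simp
    · simp only [pvDec, h, List.takeWhile_cons, List.dropWhile_cons, Bool.false_eq_true, if_false]
      simp

lemma pvMainAux : ∀ (n : Nat) (l : List String), l.length ≤ n → ∀ (b : Int),
    (PySem.List.sorted2 (pvDec l b) (fun p => p.1) (fun p => p.2) false).map (fun p => p.2)
      = pvG [] l := by
  intro n
  induction n with
  | zero =>
    intro l hl b
    have : l = [] := List.length_eq_zero_iff.mp (Nat.le_zero.mp hl)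
    subst this
    simp [pvDec, pvG, pvSorted2_eq, PySem.List.sorted]
  | succ m ih =>
    intro l hl b
    rw [pvDec_run l b, pvG_run l []]
    have hrun : ∀ p ∈ (l.takeWhile (fun s => PySem.Str.startswith s "add ")).map
        (fun s => ((2 * b : Int), s)), p.1 = 2 * b := by
      intro p hp
      rcases List.mem_map.mp hp with ⟨s, _, rfl⟩
      rfl
    cases hd : l.dropWhile (fun s => PySem.Str.startswith s "add ") with
    | nil =>
      simp only [List.append_nil]
      rw [pvSorted2_const _ (2 * b) hrun]
      simp
    | cons y ys =>
      dsimp only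
      rw [show ((2 * b + 1, y) :: pvDec ys (b + 1))
            = [((2 * b + 1 : Int), y)] ++ pvDec ys (b + 1) from rfl]
      rw [← List.append_assoc]
      rw [pvSorted2_split _ (pvDec ys (b + 1)) (by
        intro a ha p hp
        have h2 := pvDec_lb ys (b + 1) p hp
        rcases List.mem_append.mp ha with ha1 | ha1
        · have := hrun a ha1; omega
        · simp only [List.mem_singleton] at ha1; subst ha1; show 2 * b + 1 < p.1; omega)]
      rw [pvSorted2_split _ [((2 * b + 1 : Int), y)] (by
        intro a ha p hp
        simp at hp; subst hp
        have := hrun a ha; simp only [this]; show 2 * b < 2 * b + 1; omega)]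
      have hys : ys.length ≤ m := by
        have h1 : (l.dropWhile (fun s => PySem.Str.startswith s "add ")).length ≤ l.length :=
          List.length_dropWhile_le _ _
        rw [hd] at h1
        simp at h1
        omega
      rw [List.map_append, List.map_append]
      rw [pvSorted2_const _ (2 * b) hrun, ih ys hys (b + 1)]
      have hsingle : (PySem.List.sorted2 [((2 * b + 1 : Int), y)]
          (fun p => p.1) (fun p => p.2) false).map (fun p => p.2) = [y] := rfl
      rw [hsingle]
      simp

lemma pvMain (l : List String) (b : Int) :
    (PySem.List.sorted2 (pvDec l b) (fun p => p.1) (fun p => p.2) false).map (fun p => p.2)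
      = pvG [] l := pvMainAux l.length l le_rfl b

-- ===== VERDICT (by name: the statement is the Claim_ definition above) =====
theorem diff_filter_py_spec : Claim_equal_diff_filter_py := by
  intro diff _
  unfold Spec_diff_filter_py diff_filter_py diff_filter_py_alt
  have hA := pvA_loop diff [] []
  simp only [List.nil_append] at hA
  have hB := pvB_loop diff [] 0
  simp only [List.nil_append] at hB
  simp only [hB, hA, pvMain diff 0]
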